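-- pv_equiv track=rewrite | github.com/n00-name/EGE-inf-2025 | rep/19.12.24/15.py | is_true_for_all_A
-- ===== SOURCE A (Python) =====
-- def is_true_for_all_A(A):
--     for x in range(1, 200):  # Проверяем для всех натуральных x (ограничиваем до 200)
--         # Выражение ДЕЛ(x, A)
--         DEL_x_A = (x % A == 0)
--
--         # Условие x ∈ [70, 90]
--         in_interval = (70 <= x <= 90)
--
--         # Условие ¬ДЕЛ(x, 22)
--         not_DEL_x_22 = (x % 22 != 0)
--
--         # Логическое выражение
--         expr = DEL_x_A or (not in_interval or not_DEL_x_22)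
--
--         # Если для какого-то x выражение не истинно, то A не подходит
--         if not expr:
--             return False
--     return True
-- ===== SOURCE B (Python) =====
-- def is_true_for_all_A(A):
--     # The only x in 1..199 with x in [70,90] and x % 22 == 0 is x = 88,
--     # so the formula holds for all x iff 88 is divisible by A.
--     return 88 % A == 0
-- ===== Notes on version B (the rewrite author's own statement) =====
-- stated objective: simpler
-- what changed: Replaces the 199-iteration scan with the single closed-form test 88 % A == 0, since x = 88 is the only x in range(1,200) with x in [70,90] and 22 | x.
import Mathlib
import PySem

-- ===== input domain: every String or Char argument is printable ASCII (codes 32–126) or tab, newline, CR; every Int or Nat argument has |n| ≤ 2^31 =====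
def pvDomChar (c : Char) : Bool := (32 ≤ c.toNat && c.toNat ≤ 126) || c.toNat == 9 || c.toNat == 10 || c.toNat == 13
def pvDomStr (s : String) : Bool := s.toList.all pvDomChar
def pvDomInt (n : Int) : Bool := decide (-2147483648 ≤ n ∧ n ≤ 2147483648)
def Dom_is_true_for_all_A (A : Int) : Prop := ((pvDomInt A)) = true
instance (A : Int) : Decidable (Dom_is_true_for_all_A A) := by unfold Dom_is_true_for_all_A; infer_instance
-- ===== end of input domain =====

-- B replaces A's 199-iteration scan with the closed form `88 % A == 0` (simpler; equal on all A ≠ 0).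

-- ===== PORT A =====
-- loop body of A, folded over the remaining range values; returns early on a failing x
def isTrueLoopA (A : Int) : List Int → Bool
  | [] => true
  | x :: rest =>
    let DEL_x_A := PySem.Int.mod x A == 0
    let in_interval := decide (70 ≤ x) && decide (x ≤ 90)
    let not_DEL_x_22 := PySem.Int.mod x 22 != 0
    let expr := DEL_x_A || (!in_interval || not_DEL_x_22)
    if !expr then false else isTrueLoopA A rest

def is_true_for_all_A (A : Int) : Bool :=
  isTrueLoopA A (PySem.List.pyRange 1 200 1)

-- ===== PORT B =====
def is_true_for_all_A_alt (A : Int) : Bool :=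
  PySem.Int.mod 88 A == 0

-- ===== PRECONDITION & SPEC =====
-- A (and B) raise ZeroDivisionError when A = 0, so exactly A ≠ 0 is admitted.
def Pre_is_true_for_all_A (A : Int) : Prop := A ≠ 0
instance (A : Int) : Decidable (Pre_is_true_for_all_A A) := by unfold Pre_is_true_for_all_A; infer_instance
def pvWitness_is_true_for_all_A : Int := 4

def Spec_is_true_for_all_A (A : Int) (out : Bool) : Prop := out = is_true_for_all_A_alt A
instance (A : Int) (out : Bool) : Decidable (Spec_is_true_for_all_A A out) := by unfold Spec_is_true_for_all_A; infer_instance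

-- ===== CLAIM (what is proved, stated in full; the proofs are below) =====
def Claim_equal_is_true_for_all_A : Prop := ∀ (A : Int), Dom_is_true_for_all_A A → Pre_is_true_for_all_A A → Spec_is_true_for_all_A A (is_true_for_all_A A)

-- ===== LEMMAS AND PROOFS =====

-- the part of A's loop condition that does not depend on A
def sideCond (x : Int) : Bool := !(decide (70 ≤ x) && decide (x ≤ 90)) || (PySem.Int.mod x 22 != 0)

-- when the A-independent part holds on every element, the loop just passes through
theorem isTrueLoopA_all_side (A : Int) (xs : List Int) (h : ∀ x ∈ xs, sideCond x = true) :
    isTrueLoopA A xs = true := by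
  induction xs with
  | nil => rfl
  | cons x rest ih =>
    have hx : sideCond x = true := h x (List.mem_cons_self ..)
    have hrest := ih (fun y hy => h y (List.mem_cons_of_mem _ hy))
    simp only [isTrueLoopA, sideCond] at *
    rw [hx]
    simpa using hrest

theorem isTrueLoopA_append_side (A : Int) (xs ys : List Int) (h : ∀ x ∈ xs, sideCond x = true) :
    isTrueLoopA A (xs ++ ys) = isTrueLoopA A ys := by
  induction xs with
  | nil => rfl
  | cons x rest ih =>
    have hx : sideCond x = true := h x (List.mem_cons_self ..)
    have := ih (fun y hy => h y (List.mem_cons_of_mem _ hy))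
    simp only [List.cons_append, isTrueLoopA, sideCond] at *
    rw [hx]
    simpa using this

theorem range_split : PySem.List.pyRange 1 200 1 =
    PySem.List.pyRange 1 88 1 ++ 88 :: PySem.List.pyRange 89 200 1 := by
  have h1 : PySem.List.pyRange 1 200 1 = PySem.List.pyRange 1 88 1 ++ PySem.List.pyRange 88 200 1 :=
    PySem.List.pyRange_one_append 1 88 200 (by omega) (by omega)
  have h2 : PySem.List.pyRange 88 200 1 = 88 :: PySem.List.pyRange 89 200 1 :=
    PySem.List.pyRange_one_cons (by omega)
  rw [h1, h2]

theorem side_lo : ∀ x ∈ PySem.List.pyRange 1 88 1, sideCond x = true := by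
  intro x hx
  rw [PySem.List.mem_pyRange_one] at hx
  obtain ⟨h1, h2⟩ := hx
  simp only [sideCond]
  interval_cases x <;> decide

theorem side_hi : ∀ x ∈ PySem.List.pyRange 89 200 1, sideCond x = true := by
  intro x hx
  rw [PySem.List.mem_pyRange_one] at hx
  obtain ⟨h1, h2⟩ := hx
  simp only [sideCond]
  interval_cases x <;> decide

-- ===== VERDICT (by name: the statement is the Claim_ definition above) =====
theorem is_true_for_all_A_spec : Claim_equal_is_true_for_all_A := by
  intro A _ _
  unfold Spec_is_true_for_all_A is_true_for_all_A is_true_for_all_A_alt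
  rw [range_split, isTrueLoopA_append_side A _ _ side_lo]
  simp only [isTrueLoopA]
  have h88 : sideCond 88 = false := by decide
  simp only [sideCond] at h88
  by_cases h : PySem.Int.mod 88 A == 0
  · rw [h]
    simpa [h] using isTrueLoopA_all_side A _ side_hi
  · simp only [Bool.not_eq_true] at h
    simp [h]
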